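-- pv_equiv track=rewrite | github.com/japcio/python | kropek.py | declare_empty_table
-- ===== SOURCE A (Python) =====
-- def declare_empty_table(window_size):
--     two_dimension_array=[]
--     for i in range (0,window_size):
--        two_dimension_array.append([])
--        for j in range(0, window_size):
--            two_dimension_array[i].append(" ")
--
--     #write border in table
--     for i in range(0,window_size):
--         two_dimension_array[0][i]="_"
--         two_dimension_array[window_size-1][i]="-"
--     for i in range (1,window_size-1):
--         two_dimension_array[i][0]="|"
--         two_dimension_array[i][window_size-1]="|"
--     return two_dimension_array
-- ===== SOURCE B (Python) =====
-- def declare_empty_table(window_size):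
--     n = window_size
--
--     def cell(i, j):
--         if i == n - 1:
--             return "-"
--         if i == 0:
--             return "_"
--         if j == 0 or j == n - 1:
--             return "|"
--         return " "
--
--     return [[cell(i, j) for j in range(n)] for i in range(n)]
-- ===== Notes on version B (the rewrite author's own statement) =====
-- stated objective: simpler
-- what changed: Builds the grid in a single nested comprehension computing each cell directly from its coordinates, instead of filling an n*n grid with spaces and then overwriting the four borders in three further passes.
import Mathlib
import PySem

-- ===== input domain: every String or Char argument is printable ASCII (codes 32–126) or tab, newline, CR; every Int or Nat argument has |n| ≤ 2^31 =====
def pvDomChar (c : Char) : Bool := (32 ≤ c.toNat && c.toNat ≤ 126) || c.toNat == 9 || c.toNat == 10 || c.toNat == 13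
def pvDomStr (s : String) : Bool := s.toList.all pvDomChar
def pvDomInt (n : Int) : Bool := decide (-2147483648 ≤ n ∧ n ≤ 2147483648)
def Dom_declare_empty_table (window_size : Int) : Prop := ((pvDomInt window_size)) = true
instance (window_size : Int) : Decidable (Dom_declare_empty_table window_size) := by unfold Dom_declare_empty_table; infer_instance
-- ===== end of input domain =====

-- B builds the grid in one coordinate-driven comprehension instead of A's fill-with-spaces-then-overwrite-borders passes (objective: simpler).

-- ===== PORT A =====
-- pyGetD/pySetD are exact here: every index A uses is in range on every iteration it performs.
def declare_empty_table (window_size : Int) : List (List String) :=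
  let t1 := (PySem.List.pyRange 0 window_size 1).foldl (fun acc i =>
      (PySem.List.pyRange 0 window_size 1).foldl
        (fun acc2 _ => PySem.List.pySetD acc2 i ((PySem.List.pyGetD acc2 i []) ++ [" "]))
        (acc ++ [[]])) []
  let t2 := (PySem.List.pyRange 0 window_size 1).foldl (fun acc i =>
      let a1 := PySem.List.pySetD acc 0 (PySem.List.pySetD (PySem.List.pyGetD acc 0 []) i "_")
      PySem.List.pySetD a1 (window_size - 1)
        (PySem.List.pySetD (PySem.List.pyGetD a1 (window_size - 1) []) i "-")) t1
  (PySem.List.pyRange 1 (window_size - 1) 1).foldl (fun acc i =>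
      let a1 := PySem.List.pySetD acc i (PySem.List.pySetD (PySem.List.pyGetD acc i []) 0 "|")
      PySem.List.pySetD a1 i
        (PySem.List.pySetD (PySem.List.pyGetD a1 i []) (window_size - 1) "|")) t2

-- ===== PORT B =====
def pvCell (n i j : Int) : String :=
  if i = n - 1 then "-"
  else if i = 0 then "_"
  else if j = 0 ∨ j = n - 1 then "|"
  else " "

def declare_empty_table_alt (window_size : Int) : List (List String) :=
  (PySem.List.pyRange 0 window_size 1).map (fun i =>
    (PySem.List.pyRange 0 window_size 1).map (fun j => pvCell window_size i j))

-- ===== PRECONDITION & SPEC =====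
def Spec_declare_empty_table (window_size : Int) (out : List (List String)) : Prop := out = declare_empty_table_alt window_size
instance (window_size : Int) (out : List (List String)) : Decidable (Spec_declare_empty_table window_size out) := by unfold Spec_declare_empty_table; infer_instance

-- ===== CLAIM (what is proved, stated in full; the proofs are below) =====
def Claim_equal_declare_empty_table : Prop := ∀ (window_size : Int), Dom_declare_empty_table window_size → Spec_declare_empty_table window_size (declare_empty_table window_size)

-- ===== LEMMAS AND PROOFS =====

-- generic list helpers: get/set at the length of a prefix
theorem pvGetD_append_len {α : Type} (pre l : List α) (d : α) :
    (pre ++ l).getD pre.length d = l.getD 0 d := by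
  induction pre with
  | nil => rfl
  | cons x t ih => simpa using ih

theorem pvSet_append_len {α : Type} (pre l : List α) (v : α) :
    (pre ++ l).set pre.length v = pre ++ l.set 0 v := by
  induction pre with
  | nil => rfl
  | cons x t ih => simp [ih]

theorem pvGetD_append_len' {α : Type} (pre l : List α) (d : α) (n : Nat)
    (hn : n = pre.length) : (pre ++ l).getD n d = l.getD 0 d := by
  subst hn; exact pvGetD_append_len pre l d

theorem pvSet_append_len' {α : Type} (pre l : List α) (v : α) (n : Nat)
    (hn : n = pre.length) : (pre ++ l).set n v = pre ++ l.set 0 v := by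
  subst hn; exact pvSet_append_len pre l v

theorem pvRepl_succ {α : Type} (k : Nat) (a : α) :
    List.replicate k a ++ [a] = List.replicate (k + 1) a := by
  simpa using (List.replicate_succ' (n := k) (a := a)).symm

theorem pvSet_fill {α : Type} (k j : Nat) (a b : α) (hj : 0 < j) :
    (List.replicate k a ++ List.replicate j b).set k a
      = List.replicate (k + 1) a ++ List.replicate (j - 1) b := by
  obtain ⟨j', rfl⟩ : ∃ j', j = j' + 1 := ⟨j - 1, by omega⟩
  have h := pvSet_append_len (List.replicate k a) (List.replicate (j' + 1) b) a
  simp only [List.length_replicate] at h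
  rw [h]
  simp only [List.set_cons_zero, List.replicate_succ, Nat.add_sub_cancel]
  rw [show a :: List.replicate j' b = [a] ++ List.replicate j' b from rfl, ← List.append_assoc,
    pvRepl_succ, List.replicate_succ]

-- the inner append loop of phase 1: appends l.length spaces to the freshly appended last row
theorem pvInnerFold (l : List Int) (i : Int) (pre : List (List String)) (r : List String)
    (hi : i = pre.length) :
    l.foldl (fun acc2 _ => PySem.List.pySetD acc2 i ((PySem.List.pyGetD acc2 i []) ++ [" "]))
      (pre ++ [r]) = pre ++ [r ++ List.replicate l.length " "] := by
  induction l generalizing r with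
  | nil => simp
  | cons x t ih =>
      subst hi
      simp only [List.foldl_cons, PySem.List.pyGetD_natCast, PySem.List.pySetD_natCast,
        pvGetD_append_len, pvSet_append_len]
      simpa [List.replicate_succ, List.append_assoc] using ih (r ++ [" "])

theorem pvPhase1 (m : Nat) (k : Nat) :
    ((List.range k).map (fun j : Nat => (j : Int))).foldl (fun acc i =>
        ((List.range m).map (fun j : Nat => (j : Int))).foldl
          (fun acc2 _ => PySem.List.pySetD acc2 i ((PySem.List.pyGetD acc2 i []) ++ [" "]))
          (acc ++ [[]])) []
      = List.replicate k (List.replicate m " ") := by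
  induction k with
  | zero => rfl
  | succ k ih =>
      rw [List.range_succ, List.map_append, List.foldl_append, ih]
      simp only [List.map_cons, List.map_nil, List.foldl_cons, List.foldl_nil]
      have h := pvInnerFold ((List.range m).map (fun j : Nat => (j : Int))) (k : Int)
        (List.replicate k (List.replicate m " ")) [] (by simp)
      rw [h]
      simp [pvRepl_succ]

-- shape lemma for the bordered grid: element i of u :: (replicate (m-2) x ++ [d])
theorem pvCF_get {α : Type} (m i : Nat) (u x d : α) (hm : 2 ≤ m) (hi : i < m)
    (hlen : i < (u :: (List.replicate (m - 2) x ++ [d])).length) :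
    (u :: (List.replicate (m - 2) x ++ [d]))[i]'hlen
      = if i = 0 then u else if i = m - 1 then d else x := by
  rcases Nat.eq_zero_or_pos i with h0 | h0
  · subst h0; rfl
  · obtain ⟨i', rfl⟩ : ∃ i', i = i' + 1 := ⟨i - 1, by omega⟩
    simp only [List.getElem_cons_succ]
    by_cases hl : i' + 1 = m - 1
    · have hpre : (List.replicate (m - 2) x).length ≤ i' := by simp; omega
      rw [List.getElem_append_right hpre, if_neg (by omega : ¬ (i' + 1 = 0)), if_pos hl]
      simp
    · rw [List.getElem_append_left (by simp; omega), if_neg (by omega : ¬ (i' + 1 = 0)),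
        if_neg hl]
      simp

theorem pvSetD_zero_cons {α : Type} (x v : α) (xs : List α) :
    PySem.List.pySetD (x :: xs) 0 v = v :: xs := by
  rw [PySem.List.pySetD_of_nonneg _ v (by norm_num)]
  simp

theorem pvRepl_cons_append {α : Type} (m : Nat) (hm : 2 ≤ m) (a : α) :
    List.replicate m a = a :: (List.replicate (m - 2) a ++ [a]) := by
  obtain ⟨j, rfl⟩ : ∃ j, m = j + 2 := ⟨m - 2, by omega⟩
  rw [show j + 2 - 2 = j by omega, pvRepl_succ, List.replicate_succ]

theorem pvStep2 (m k : Nat) (hm : 2 ≤ m) (hk : k + 1 ≤ m) :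
    (let acc := (List.replicate k "_" ++ List.replicate (m - k) " ") ::
        (List.replicate (m - 2) (List.replicate m " ")
          ++ [List.replicate k "-" ++ List.replicate (m - k) " "]);
     let a1 := PySem.List.pySetD acc 0 (PySem.List.pySetD (PySem.List.pyGetD acc 0 []) (k : Int) "_");
     PySem.List.pySetD a1 ((m : Int) - 1)
       (PySem.List.pySetD (PySem.List.pyGetD a1 ((m : Int) - 1) []) (k : Int) "-"))
    = (List.replicate (k + 1) "_" ++ List.replicate (m - (k + 1)) " ") ::
        (List.replicate (m - 2) (List.replicate m " ")
          ++ [List.replicate (k + 1) "-" ++ List.replicate (m - (k + 1)) " "]) := by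
  simp only [PySem.List.pyGetD_zero_cons, PySem.List.pySetD_natCast, pvSetD_zero_cons]
  rw [pvSet_fill k (m - k) "_" " " (by omega)]
  rw [show ((m : Int) - 1) = (((m - 1 : Nat)) : Int) by omega]
  rw [PySem.List.pyGetD_natCast, PySem.List.pySetD_natCast]
  rw [← List.cons_append, pvGetD_append_len' _ _ _ (m - 1) (by simp; omega)]
  rw [List.getD_cons_zero]
  rw [pvSet_fill k (m - k) "-" " " (by omega)]
  rw [pvSet_append_len' _ _ _ (m - 1) (by simp; omega)]
  rw [List.set_cons_zero, List.cons_append, Nat.sub_add_eq]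

theorem pvPhase2 (m : Nat) (hm : 2 ≤ m) (k : Nat) (hk : k ≤ m) :
    ((List.range k).map (fun j : Nat => (j : Int))).foldl (fun acc i =>
        let a1 := PySem.List.pySetD acc 0 (PySem.List.pySetD (PySem.List.pyGetD acc 0 []) i "_")
        PySem.List.pySetD a1 ((m : Int) - 1)
          (PySem.List.pySetD (PySem.List.pyGetD a1 ((m : Int) - 1) []) i "-"))
      (List.replicate m (List.replicate m " "))
      = (List.replicate k "_" ++ List.replicate (m - k) " ") ::
        (List.replicate (m - 2) (List.replicate m " ")
          ++ [List.replicate k "-" ++ List.replicate (m - k) " "]) := by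
  induction k with
  | zero =>
      simp only [List.range_zero, List.map_nil, List.foldl_nil, List.replicate_zero,
        List.nil_append, Nat.sub_zero]
      rw [pvRepl_cons_append m hm (List.replicate m " ")]
  | succ k ih =>
      rw [List.range_succ, List.map_append, List.foldl_append, ih (by omega)]
      simp only [List.map_cons, List.map_nil, List.foldl_cons, List.foldl_nil]
      exact pvStep2 m k hm hk

theorem pvGetD_repl_append {α : Type} (k : Nat) (a : α) (l : List α) (d : α) :
    (List.replicate k a ++ l).getD k d = l.getD 0 d :=
  pvGetD_append_len' _ _ _ _ (by simp)

theorem pvSet_repl_append {α : Type} (k : Nat) (a v : α) (l : List α) :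
    (List.replicate k a ++ l).set k v = List.replicate k a ++ l.set 0 v :=
  pvSet_append_len' _ _ _ _ (by simp)

theorem pvRow3 (m : Nat) (hm : 2 ≤ m) :
    (PySem.List.pySetD (List.replicate m " ") 0 "|").set (m - 2 + 1) "|"
      = "|" :: (List.replicate (m - 2) " " ++ ["|"]) := by
  obtain ⟨j, rfl⟩ : ∃ j, m = j + 2 := ⟨m - 2, by omega⟩
  rw [show j + 2 - 2 = j by omega, List.replicate_succ, pvSetD_zero_cons, List.set_cons_succ,
    ← pvRepl_succ, pvSet_repl_append, List.set_cons_zero]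

theorem pvStep3 (m k : Nat) (hm : 2 ≤ m) (hk : k + 1 ≤ m - 2) :
    (let acc := List.replicate m "_" ::
        ((List.replicate k ("|" :: (List.replicate (m - 2) " " ++ ["|"]))
            ++ List.replicate (m - 2 - k) (List.replicate m " ")) ++ [List.replicate m "-"]);
     let a1 := PySem.List.pySetD acc ((1 : Int) + (k : Int))
        (PySem.List.pySetD (PySem.List.pyGetD acc ((1 : Int) + (k : Int)) []) 0 "|");
     PySem.List.pySetD a1 ((1 : Int) + (k : Int))
       (PySem.List.pySetD (PySem.List.pyGetD a1 ((1 : Int) + (k : Int)) []) ((m : Int) - 1) "|"))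
    = List.replicate m "_" ::
        ((List.replicate (k + 1) ("|" :: (List.replicate (m - 2) " " ++ ["|"]))
            ++ List.replicate (m - 2 - (k + 1)) (List.replicate m " ")) ++ [List.replicate m "-"]) := by
  rw [show ((1 : Int) + (k : Int)) = (((k + 1 : Nat)) : Int) by push_cast; ring]
  rw [show ((m : Int) - 1) = (((m - 2 + 1 : Nat)) : Int) by omega]
  simp only [PySem.List.pyGetD_natCast, PySem.List.pySetD_natCast]
  rw [List.append_assoc, show m - 2 - k = (m - 2 - k - 1) + 1 by omega, List.replicate_succ,
    List.cons_append]
  simp only [List.getD_cons_succ, pvGetD_repl_append, List.getD_cons_zero,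
    List.set_cons_succ, pvSet_repl_append, List.set_cons_zero]
  rw [pvRow3 m hm]
  rw [List.append_cons, pvRepl_succ, ← List.append_assoc, Nat.sub_add_eq]

theorem pvPhase3 (m : Nat) (hm : 2 ≤ m) (k : Nat) (hk : k ≤ m - 2) :
    ((List.range k).map (fun j : Nat => (1 : Int) + (j : Int))).foldl (fun acc i =>
        let a1 := PySem.List.pySetD acc i (PySem.List.pySetD (PySem.List.pyGetD acc i []) 0 "|")
        PySem.List.pySetD a1 i
          (PySem.List.pySetD (PySem.List.pyGetD a1 i []) ((m : Int) - 1) "|"))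
      (List.replicate m "_" ::
        (List.replicate (m - 2) (List.replicate m " ") ++ [List.replicate m "-"]))
      = List.replicate m "_" ::
        ((List.replicate k ("|" :: (List.replicate (m - 2) " " ++ ["|"]))
            ++ List.replicate (m - 2 - k) (List.replicate m " ")) ++ [List.replicate m "-"]) := by
  induction k with
  | zero =>
      simp only [List.range_zero, List.map_nil, List.foldl_nil, List.replicate_zero,
        List.nil_append, Nat.sub_zero]
  | succ k ih =>
      rw [List.range_succ, List.map_append, List.foldl_append, ih (by omega)]
      simp only [List.map_cons, List.map_nil, List.foldl_cons, List.foldl_nil]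
      exact pvStep3 m k hm hk

-- ===== VERDICT (by name: the statement is the Claim_ definition above) =====
theorem declare_empty_table_spec : Claim_equal_declare_empty_table := by
  intro n _
  unfold Spec_declare_empty_table declare_empty_table declare_empty_table_alt
  dsimp only
  by_cases h0 : n ≤ 0
  · rw [PySem.List.pyRange_one_eq_nil h0, PySem.List.pyRange_one_eq_nil (by omega : n - 1 ≤ 1)]
    simp
  · by_cases h1 : n = 1
    · subst h1; decide
    · obtain ⟨m, rfl⟩ : ∃ m : Nat, n = (m : Int) := ⟨n.toNat, by omega⟩
      have hm2 : 2 ≤ m := by omega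
      rw [PySem.List.pyRange_one 0 (m : Int), PySem.List.pyRange_one 1 ((m : Int) - 1)]
      simp only [Int.sub_zero, Int.toNat_natCast, zero_add]
      rw [show ((m : Int) - 1 - 1).toNat = m - 2 by omega]
      rw [pvPhase1 m m, pvPhase2 m hm2 m le_rfl]
      simp only [Nat.sub_self, List.replicate_zero, List.append_nil]
      rw [pvPhase3 m hm2 (m - 2) le_rfl]
      simp only [Nat.sub_self, List.replicate_zero, List.append_nil, List.map_map]
      apply List.ext_getElem
      · simp
        omega
      · intro i h1 h2
        have hi : i < m := by simpa using h2
        rw [pvCF_get m i _ _ _ hm2 hi]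
        rw [List.getElem_map, List.getElem_range]
        dsimp only [Function.comp]
        by_cases hz : i = 0
        · subst hz
          rw [if_pos rfl]
          symm
          refine List.eq_replicate_iff.mpr ⟨by simp, ?_⟩
          intro b hb
          simp only [List.mem_map, List.mem_range, Function.comp] at hb
          obtain ⟨j, hj, rfl⟩ := hb
          unfold pvCell
          split_ifs with c1 c2 c3 <;> first | rfl | (exfalso; omega)
        · by_cases hl : i = m - 1
          · rw [if_neg hz, if_pos hl]
            subst hl
            symm
            refine List.eq_replicate_iff.mpr ⟨by simp, ?_⟩
            intro b hb
            simp only [List.mem_map, List.mem_range, Function.comp] at hb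
            obtain ⟨j, hj, rfl⟩ := hb
            unfold pvCell
            split_ifs with c1 <;> first | rfl | (exfalso; omega)
          · rw [if_neg hz, if_neg hl]
            apply List.ext_getElem
            · simp
              omega
            · intro j hj1 hj2
              have hj : j < m := by simpa using hj2
              rw [pvCF_get m j _ _ _ hm2 hj]
              rw [List.getElem_map, List.getElem_range]
              dsimp only [Function.comp]
              unfold pvCell
              split_ifs with c1 c2 c3 c4 c5 <;> first | rfl | (exfalso; omega)
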